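-- pv_equiv track=rewrite | github.com/dansschwartz/bitcoin-trading-bot-renaissance | scripts/patch_notebook.py | str_to_source
-- ===== SOURCE A (Python) =====
-- def str_to_source(s):
--     lines = s.split('\n')
--     result = []
--     for i, line in enumerate(lines):
--         if i < len(lines) - 1:
--             result.append(line + '\n')
--         elif line:
--             result.append(line)
--     return result
-- ===== SOURCE B (Python) =====
-- def str_to_source(s):
--     # single pass over the characters: emit a line whenever '\n' is seen,
--     # and the leftover (if any) at the end; no split, no index arithmetic
--     result = []
--     cur = []
--     for c in s:
--         cur.append(c)
--         if c == '\n':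
--             result.append(''.join(cur))
--             cur = []
--     if cur:
--         result.append(''.join(cur))
--     return result
-- ===== Notes on version B (the rewrite author's own statement) =====
-- stated objective: simpler
-- what changed: B replaces the split-on-newline plus index-counting loop over enumerate with a single character scan that emits a line whenever it passes a newline and flushes the non-empty remainder at the end.
import Mathlib
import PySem

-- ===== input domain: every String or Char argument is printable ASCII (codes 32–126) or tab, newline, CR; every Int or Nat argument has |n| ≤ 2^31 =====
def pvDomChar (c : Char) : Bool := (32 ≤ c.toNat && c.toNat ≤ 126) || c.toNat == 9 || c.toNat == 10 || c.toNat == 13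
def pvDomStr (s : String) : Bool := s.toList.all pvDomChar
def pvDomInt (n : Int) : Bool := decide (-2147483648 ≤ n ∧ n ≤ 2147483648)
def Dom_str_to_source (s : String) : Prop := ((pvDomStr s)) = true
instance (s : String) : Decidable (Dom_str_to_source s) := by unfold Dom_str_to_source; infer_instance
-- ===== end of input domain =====

-- B replaces A's split('\n')+enumerate-indexed loop by a single character scan (simpler; same cost).

-- ===== PORT A =====
def str_to_source (s : String) : List String :=
  let lines := PySem.Chars.splitOn s.toList ['\n']
  (PySem.List.enumerate lines).foldl
    (fun result p =>
      if p.1 < (lines.length : Int) - 1 then result ++ [String.mk (p.2 ++ ['\n'])]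
      else if p.2 ≠ [] then result ++ [String.mk p.2]
      else result) []

-- ===== PORT B =====
-- the scan: cur = chars of the current line so far (reversed accumulator)
def pvScan (acc : List Char) : List Char → List String
  | [] => if acc.isEmpty then [] else [String.mk acc.reverse]
  | c :: rest =>
    if c = '\n' then String.mk (c :: acc).reverse :: pvScan [] rest
    else pvScan (c :: acc) rest

def str_to_source_alt (s : String) : List String := pvScan [] s.toList

-- ===== PRECONDITION & SPEC =====
def Spec_str_to_source (s : String) (out : List String) : Prop := out = str_to_source_alt s
instance (s : String) (out : List String) : Decidable (Spec_str_to_source s out) := by unfold Spec_str_to_source; infer_instance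

-- ===== CLAIM (what is proved, stated in full; the proofs are below) =====
def Claim_equal_str_to_source : Prop := ∀ (s : String), Dom_str_to_source s → Spec_str_to_source s (str_to_source s)

-- ===== LEMMAS AND PROOFS =====

-- reference splitter: pvSp pre l = the '\n'-split of (pre ++ l) with pre already read
def pvSp (pre : List Char) : List Char → List (List Char)
  | [] => [pre]
  | c :: rest => if c = '\n' then pre :: pvSp [] rest else pvSp (pre ++ [c]) rest

-- glue the split pieces back the way A's loop does
def pvGlue : List (List Char) → List String
  | [] => []
  | [l] => if l = [] then [] else [String.mk l]
  | l :: r :: rest => String.mk (l ++ ['\n']) :: pvGlue (r :: rest)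

theorem pvSp_ne_nil (pre l) : pvSp pre l ≠ [] := by
  induction l generalizing pre with
  | nil => simp [pvSp]
  | cons c rest ih => simp only [pvSp]; split_ifs <;> simp [ih]

theorem splitOn_go_eq (fuel : Nat) :
    ∀ (l cur acc : List Char) (accs : List (List Char)), l.length < fuel →
      PySem.Chars.splitOn.go ['\n'] fuel l cur accs = accs.reverse ++ pvSp cur.reverse l := by
  induction fuel with
  | zero => intro l cur acc accs h; omega
  | succ f ih =>
    intro l cur acc accs h
    cases l with
    | nil => simp [PySem.Chars.splitOn.go, pvSp]
    | cons c rest =>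
      by_cases hc : c = '\n'
      · subst hc
        have hpre : List.isPrefixOf ['\n'] ('\n' :: rest) = true := by
          simp [List.isPrefixOf]
        rw [PySem.Chars.splitOn.go, if_pos hpre]
        rw [show List.drop ['\n'].length ('\n' :: rest) = rest from by simp]
        simp only [List.length_cons] at h
        rw [ih rest [] acc (cur.reverse :: accs) (by omega)]
        simp [pvSp]
      · have hpre : List.isPrefixOf ['\n'] (c :: rest) = false := by
          simp [List.isPrefixOf, Ne.symm hc]
        rw [PySem.Chars.splitOn.go, if_neg (by simp [hpre])]
        rw [ih rest (c :: cur) acc accs (by simpa using Nat.lt_of_succ_lt_succ h)]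
        simp [pvSp, hc]

theorem splitOn_eq (cs : List Char) : PySem.Chars.splitOn cs ['\n'] = pvSp [] cs := by
  have := splitOn_go_eq (cs.length + 1) cs [] [] [] (by omega)
  simpa [PySem.Chars.splitOn] using this

theorem pvScan_eq (cs : List Char) : ∀ acc, pvScan acc cs = pvGlue (pvSp acc.reverse cs) := by
  induction cs with
  | nil =>
    intro acc
    cases acc <;> simp [pvScan, pvSp, pvGlue]
  | cons c rest ih =>
    intro acc
    by_cases hc : c = '\n'
    · subst hc
      rw [show pvScan acc ('\n' :: rest) = String.mk ('\n' :: acc).reverse :: pvScan [] rest from by simp [pvScan]]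
      rw [show pvSp acc.reverse ('\n' :: rest) = acc.reverse :: pvSp [] rest from by simp [pvSp]]
      rw [ih []]
      cases h : pvSp [] rest with
      | nil => exact absurd h (pvSp_ne_nil _ _)
      | cons x xs => simp [h, pvGlue]
    · simp only [pvScan, pvSp, if_neg hc, ih (c :: acc)]
      simp

theorem pvGlue_concat (init : List (List Char)) (last : List Char) :
    pvGlue (init ++ [last]) =
      init.map (fun l => String.mk (l ++ ['\n'])) ++ (if last = [] then [] else [String.mk last]) := by
  induction init with
  | nil => simp [pvGlue]
  | cons a init ih =>
    cases h : init ++ [last] with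
    | nil => simp at h
    | cons x xs =>
      simp only [List.cons_append, h, pvGlue, List.map_cons, List.cons_append]
      rw [← h, ih]

theorem fold_flat (n : Int) (ls : List (Int × List Char)) (acc : List String) :
    ls.foldl
      (fun result p =>
        if p.1 < n then result ++ [String.mk (p.2 ++ ['\n'])]
        else if p.2 ≠ [] then result ++ [String.mk p.2]
        else result) acc
    = acc ++ ls.flatMap (fun p =>
        if p.1 < n then [String.mk (p.2 ++ ['\n'])]
        else if p.2 ≠ [] then [String.mk p.2] else []) := by
  induction ls generalizing acc with
  | nil => simp
  | cons p ps ih =>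
    simp only [List.foldl_cons, List.flatMap_cons]
    split_ifs <;> rw [ih] <;> simp

theorem fold_eq_glue (ls : List (List Char)) :
    (PySem.List.enumerate ls).foldl
      (fun result p =>
        if p.1 < (ls.length : Int) - 1 then result ++ [String.mk (p.2 ++ ['\n'])]
        else if p.2 ≠ [] then result ++ [String.mk p.2]
        else result) [] = pvGlue ls := by
  induction ls using List.reverseRecOn with
  | nil => simp [PySem.List.enumerate, pvGlue]
  | append_singleton init last _ =>
    rw [fold_flat]
    rw [PySem.List.enumerate_append, List.flatMap_append, List.nil_append]
    have h1 : (PySem.List.enumerate init).flatMap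
        (fun p => if p.1 < ((init ++ [last]).length : Int) - 1 then [String.mk (p.2 ++ ['\n'])]
          else if p.2 ≠ [] then [String.mk p.2] else [])
        = init.map (fun l => String.mk (l ++ ['\n'])) := by
      rw [List.flatMap_def]
      rw [List.map_congr_left (g := fun p => [String.mk (p.2 ++ ['\n'])])]
      · rw [← List.flatMap_def, ← List.map_eq_flatMap]
        have := PySem.List.map_snd_enumerate (xs := init) (s := 0)
        calc (PySem.List.enumerate init).map (fun p => String.mk (p.2 ++ ['\n']))
            = ((PySem.List.enumerate init).map (·.2)).map (fun l => String.mk (l ++ ['\n'])) := by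
              rw [List.map_map]; rfl
          _ = init.map (fun l => String.mk (l ++ ['\n'])) := by rw [this]
      · intro p hp
        rw [PySem.List.mem_enumerate_iff] at hp
        obtain ⟨k, hk, rfl⟩ := hp
        have : (0 : Int) + k < ((init ++ [last]).length : Int) - 1 := by
          simp only [List.length_append, List.length_cons, List.length_nil]
          push_cast; omega
        rw [if_pos this]
    have h2 : (PySem.List.enumerate [last] (0 + (init.length : Int))).flatMap
        (fun p => if p.1 < ((init ++ [last]).length : Int) - 1 then [String.mk (p.2 ++ ['\n'])]
          else if p.2 ≠ [] then [String.mk p.2] else [])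
        = (if last = [] then [] else [String.mk last]) := by
      rw [PySem.List.enumerate_cons, PySem.List.enumerate_nil]
      have hnot : ¬ ((0 : Int) + (init.length : Int) < ((init ++ [last]).length : Int) - 1) := by
        simp only [List.length_append, List.length_cons, List.length_nil]
        push_cast; omega
      simp only [List.flatMap_cons, List.flatMap_nil, List.append_nil, if_neg hnot]
      split_ifs with h <;> simp_all
    rw [h1, h2, pvGlue_concat]

-- ===== VERDICT (by name: the statement is the Claim_ definition above) =====
theorem str_to_source_spec : Claim_equal_str_to_source := by
  intro s _
  show str_to_source s = str_to_source_alt s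
  rw [str_to_source, str_to_source_alt, pvScan_eq]
  simp only [List.reverse_nil, splitOn_eq]
  exact fold_eq_glue _
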